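-- pv_equiv track=rewrite | github.com/KevzPeter/Advent-of-Code-2025 | Dec_9/solution_2.py | build_allowed_prefix
-- ===== SOURCE A (Python) =====
-- from typing import List, Tuple, Dict
--
-- def build_allowed_prefix(xs: List[int], ys: List[int], blocked, outside):
--     # allowed blocks are boundary (blocked=True) plus interior (not outside and not blocked)
--     H = len(blocked)
--     W = len(blocked[0])
--
--     # prefix sum over tile-count area, not just block count
--     ps = [[0] * (W + 1) for _ in range(H + 1)]
--     for j in range(H):
--         height = ys[j + 1] - ys[j]
--         row_sum = 0
--         for i in range(W):
--             width = xs[i + 1] - xs[i]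
--             allowed = blocked[j][i] or (not blocked[j][i] and not outside[j][i])
--             area = width * height if allowed else 0
--             row_sum += area
--             ps[j + 1][i + 1] = ps[j][i + 1] + row_sum
--     return ps
-- ===== SOURCE B (Python) =====
-- def build_allowed_prefix(xs, ys, blocked, outside):
--     # Column-sum sweep: keep running per-column totals of allowed areas; each
--     # prefix row is a fresh horizontal scan of those totals, so no previously
--     # emitted prefix row is ever read; the zero row is prepended at the end.
--     W = len(blocked[0])
--     col = [0] * W
--     rows = []
--     for j in range(len(blocked)):
--         h = ys[j + 1] - ys[j]
--         for i in range(W):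
--             if blocked[j][i] or not outside[j][i]:
--                 col[i] += (xs[i + 1] - xs[i]) * h
--         row = [0]
--         s = 0
--         for c in col:
--             s += c
--             row.append(s)
--         rows.append(row)
--     return [[0] * (W + 1)] + rows
-- ===== Notes on version B (the rewrite author's own statement) =====
-- stated objective: alternative
-- what changed: A fills a preallocated matrix with the recurrence ps[j+1][i+1] = ps[j][i+1] + row_sum; B never reads a previously emitted prefix row: it maintains running per-column totals of allowed areas and emits each prefix row as a fresh horizontal scan of those totals, prepending the zero row at the end.
import Mathlib
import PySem

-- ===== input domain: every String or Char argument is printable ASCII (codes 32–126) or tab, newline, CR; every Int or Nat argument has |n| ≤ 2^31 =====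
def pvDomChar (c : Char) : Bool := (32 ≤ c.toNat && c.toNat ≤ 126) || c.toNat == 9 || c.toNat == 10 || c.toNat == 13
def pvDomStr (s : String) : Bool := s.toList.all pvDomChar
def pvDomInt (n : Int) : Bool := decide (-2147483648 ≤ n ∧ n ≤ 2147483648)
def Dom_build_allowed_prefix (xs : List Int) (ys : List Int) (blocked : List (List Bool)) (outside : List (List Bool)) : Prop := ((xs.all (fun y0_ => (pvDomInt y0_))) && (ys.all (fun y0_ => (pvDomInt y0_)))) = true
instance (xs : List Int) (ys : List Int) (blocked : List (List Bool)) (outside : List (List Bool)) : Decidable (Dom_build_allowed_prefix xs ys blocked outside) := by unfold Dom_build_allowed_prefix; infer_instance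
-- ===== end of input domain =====

-- B replaces A's row-recurrence writes into a preallocated matrix by a column-sum sweep:
-- running per-column totals, each prefix row emitted as a fresh horizontal scan of those
-- totals (no previously emitted prefix row is ever read); objective: alternative.

-- ===== PORT A =====
-- A-side helpers: the bodies of A's two loops, named so the lemmas can speak about them.
-- All list reads use getD; Pre_ guarantees every index A's Python reaches is in range
-- (on those inputs getD is exact), so the port is faithful on Pre_.

-- `area = width * height if allowed else 0` for cell i of row j (height precomputed as in A)
def pvCell (xs : List Int) (blocked : List (List Bool)) (outside : List (List Bool))
    (j : Nat) (height : Int) (i : Nat) : Int :=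
  let width := xs.getD (i+1) 0 - xs.getD i 0
  let b := (blocked.getD j []).getD i false
  let o := (outside.getD j []).getD i false
  let allowed := b || (!b && !o)
  if allowed then width * height else 0

-- body of A's inner loop: state is (ps, row_sum)
def pvAInner (xs : List Int) (blocked : List (List Bool)) (outside : List (List Bool))
    (j : Nat) (height : Int) (st : List (List Int) × Int) (i : Nat) : List (List Int) × Int :=
  let rs := st.2 + pvCell xs blocked outside j height i
  (st.1.set (j+1) ((st.1.getD (j+1) []).set (i+1) ((st.1.getD j []).getD (i+1) 0 + rs)), rs)

-- body of A's outer loop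
def pvAOuter (xs : List Int) (ys : List Int) (blocked : List (List Bool)) (outside : List (List Bool))
    (W : Nat) (ps : List (List Int)) (j : Nat) : List (List Int) :=
  -- height = ys[j+1] - ys[j], computed once per row and passed to the inner-loop body
  ((List.range W).foldl (pvAInner xs blocked outside j (ys.getD (j+1) 0 - ys.getD j 0)) (ps, 0)).1

def build_allowed_prefix (xs : List Int) (ys : List Int) (blocked : List (List Bool)) (outside : List (List Bool)) : List (List Int) :=
  let H := blocked.length
  let W := (blocked.headD []).length
  let ps := List.replicate (H+1) (List.replicate (W+1) (0:Int))
  (List.range H).foldl (pvAOuter xs ys blocked outside W) ps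

-- ===== PORT B =====
-- B-side helpers (Source B's column-update loop, its scan loop, and its per-row step)

-- `if blocked[j][i] or not outside[j][i]: col[i] += (xs[i+1]-xs[i]) * h`
def pvColStep (xs : List Int) (blocked : List (List Bool)) (outside : List (List Bool))
    (j : Nat) (h : Int) (col : List Int) (i : Nat) : List Int :=
  if (blocked.getD j []).getD i false || !((outside.getD j []).getD i false)
  then col.set i (col.getD i 0 + (xs.getD (i+1) 0 - xs.getD i 0) * h)
  else col

-- row = [0]; s = 0; for c in col: s += c; row.append(s)
def pvScanRow (col : List Int) : List Int :=
  (col.foldl (fun (st : List Int × Int) c => (st.1 ++ [st.2 + c], st.2 + c)) ([0], 0)).1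

-- one iteration of Source B's outer loop: state is (col, rows)
def pvBRow (xs : List Int) (ys : List Int) (blocked : List (List Bool)) (outside : List (List Bool))
    (W : Nat) (st : List Int × List (List Int)) (j : Nat) : List Int × List (List Int) :=
  let col := (List.range W).foldl (pvColStep xs blocked outside j (ys.getD (j+1) 0 - ys.getD j 0)) st.1
  (col, st.2 ++ [pvScanRow col])

def build_allowed_prefix_alt (xs : List Int) (ys : List Int) (blocked : List (List Bool)) (outside : List (List Bool)) : List (List Int) :=
  let W := (blocked.headD []).length
  let st := (List.range blocked.length).foldl (pvBRow xs ys blocked outside W) (List.replicate W 0, [])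
  [List.replicate (W+1) (0:Int)] ++ st.2

-- ===== PRECONDITION & SPEC =====
-- Pre_ = exactly the index bounds A's Python needs to return without an IndexError
-- (outside[j][i] is only read at unblocked cells, because the boolean short-circuits).
def Pre_build_allowed_prefix (xs : List Int) (ys : List Int) (blocked : List (List Bool)) (outside : List (List Bool)) : Prop :=
  blocked ≠ [] ∧
  blocked.length + 1 ≤ ys.length ∧
  ((blocked.headD []).length = 0 ∨ (blocked.headD []).length + 1 ≤ xs.length) ∧
  (∀ row ∈ blocked, (blocked.headD []).length ≤ row.length) ∧
  (∀ j < blocked.length, ∀ i < (blocked.headD []).length,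
      (blocked.getD j []).getD i false = false →
      j < outside.length ∧ i < (outside.getD j []).length)

instance (xs : List Int) (ys : List Int) (blocked : List (List Bool)) (outside : List (List Bool)) : Decidable (Pre_build_allowed_prefix xs ys blocked outside) := by
  unfold Pre_build_allowed_prefix; infer_instance

def pvWitness_build_allowed_prefix : List Int × List Int × List (List Bool) × List (List Bool) :=
  ([0, 1], [0, 1], [[true]], [[false]])

def Spec_build_allowed_prefix (xs : List Int) (ys : List Int) (blocked : List (List Bool)) (outside : List (List Bool)) (out : List (List Int)) : Prop := out = build_allowed_prefix_alt xs ys blocked outside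
instance (xs : List Int) (ys : List Int) (blocked : List (List Bool)) (outside : List (List Bool)) (out : List (List Int)) : Decidable (Spec_build_allowed_prefix xs ys blocked outside out) := by unfold Spec_build_allowed_prefix; infer_instance

-- ===== CLAIM (what is proved, stated in full; the proofs are below) =====
def Claim_equal_build_allowed_prefix : Prop := ∀ (xs : List Int) (ys : List Int) (blocked : List (List Bool)) (outside : List (List Bool)), Dom_build_allowed_prefix xs ys blocked outside → Pre_build_allowed_prefix xs ys blocked outside → Spec_build_allowed_prefix xs ys blocked outside (build_allowed_prefix xs ys blocked outside)

-- ===== LEMMAS AND PROOFS =====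

-- per-cell allowed area, the common value both programs accumulate
def pvArea (xs : List Int) (ys : List Int) (blocked : List (List Bool)) (outside : List (List Bool))
    (j i : Nat) : Int :=
  if (blocked.getD j []).getD i false || !((outside.getD j []).getD i false)
  then (xs.getD (i+1) 0 - xs.getD i 0) * (ys.getD (j+1) 0 - ys.getD j 0) else 0

-- running-sum scan: scanSums s [a₁, a₂, …] = [s+a₁, s+a₁+a₂, …]
def scanSums (s : Int) : List Int → List Int
  | [] => []
  | x :: t => (s + x) :: scanSums (s + x) t

-- cumulative column totals after j rows
def colAcc (xs : List Int) (ys : List Int) (blocked : List (List Bool)) (outside : List (List Bool))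
    (W : Nat) : Nat → List Int
  | 0 => List.replicate W 0
  | j+1 => List.zipWith (· + ·) (colAcc xs ys blocked outside W j)
             ((List.range W).map (pvArea xs ys blocked outside j))

-- A-side intermediate shape: append rows built from the previous row (proof-only)
def pvPref (row : List Int) : List Int :=
  row.foldl (fun p a => p ++ [p.getLastD 0 + a]) [0]

def pvBStep (ps : List (List Int)) (row : List Int) : List (List Int) :=
  ps ++ [List.zipWith (· + ·) (ps.getLastD []) (pvPref row)]

theorem scanSums_length (s : Int) (l : List Int) : (scanSums s l).length = l.length := by
  induction l generalizing s with
  | nil => rfl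
  | cons x t ih => simp [scanSums, ih]

theorem scanSums_zero : ∀ (W : Nat), scanSums 0 (List.replicate W (0:Int)) = List.replicate W 0 := by
  intro W
  induction W with
  | zero => rfl
  | succ n ih => simp [List.replicate_succ, scanSums, ih]

theorem colAcc_length (xs : List Int) (ys : List Int) (blocked : List (List Bool)) (outside : List (List Bool))
    (W j : Nat) : (colAcc xs ys blocked outside W j).length = W := by
  induction j with
  | zero => simp [colAcc]
  | succ j ih => simp [colAcc, ih]

-- zipWith (+) of two running scans is the running scan of the zipWith (+)
theorem scan_zip : ∀ (u v : List Int) (s t : Int), u.length = v.length →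
    List.zipWith (· + ·) (scanSums s u) (scanSums t v)
    = scanSums (s + t) (List.zipWith (· + ·) u v) := by
  intro u
  induction u with
  | nil => intro v s t h; cases v with | nil => rfl | cons a b => simp at h
  | cons x xt ih =>
      intro v s t h
      cases v with
      | nil => simp at h
      | cons y yt =>
          simp only [scanSums, List.zipWith_cons_cons]
          have harg : s + x + (t + y) = s + t + (x + y) := by ring
          rw [harg, ih yt (s+x) (t+y) (by simpa using h)]
          rw [show s + x + (t + y) = s + t + (x + y) from by ring]

-- B's pref loop builds the running sums
theorem foldl_pref (row : List Int) : ∀ (p : List Int) (s : Int),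
    row.foldl (fun p a => p ++ [p.getLastD 0 + a]) (p ++ [s]) = p ++ s :: scanSums s row := by
  induction row with
  | nil => intro p s; simp [scanSums]
  | cons x t ih =>
      intro p s
      have h1 : (p ++ [s]).getLastD 0 = s := by simp
      simp only [List.foldl_cons, h1]
      have := ih (p ++ [s]) (s + x)
      simp only [List.append_assoc] at this ⊢
      simpa [scanSums] using this

theorem pvPref_eq (row : List Int) : pvPref row = 0 :: scanSums 0 row := by
  have := foldl_pref row [] 0
  simpa [pvPref] using this

-- Source B's scan loop builds the running sums
theorem foldl_scan (l : List Int) : ∀ (p : List Int) (s : Int),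
    (l.foldl (fun (st : List Int × Int) c => (st.1 ++ [st.2 + c], st.2 + c)) (p, s)).1
    = p ++ scanSums s l := by
  induction l with
  | nil => intro p s; simp [scanSums]
  | cons x t ih =>
      intro p s
      simp only [List.foldl_cons]
      rw [ih (p ++ [s + x]) (s + x)]
      simp [scanSums]

theorem pvScanRow_eq (col : List Int) : pvScanRow col = 0 :: scanSums 0 col := by
  have := foldl_scan col [0] 0
  simpa [pvScanRow] using this

-- Source B's column-update loop adds this row's areas elementwise
theorem colfold (xs : List Int) (ys : List Int) (blocked : List (List Bool)) (outside : List (List Bool))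
    (j : Nat) : ∀ (m k : Nat) (col : List Int), k + m = col.length →
    (List.range' k m).foldl (pvColStep xs blocked outside j (ys.getD (j+1) 0 - ys.getD j 0)) col
    = col.take k ++ List.zipWith (· + ·) (col.drop k) ((List.range' k m).map (pvArea xs ys blocked outside j)) := by
  intro m
  induction m with
  | zero =>
      intro k col h
      simp [List.take_of_length_le (by omega : col.length ≤ k)]
  | succ m ih =>
      intro k col h
      have hk : k < col.length := by omega
      rw [List.range'_succ, List.foldl_cons]
      have hstep : pvColStep xs blocked outside j (ys.getD (j+1) 0 - ys.getD j 0) col k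
          = col.take k ++ (col[k]'hk + pvArea xs ys blocked outside j k) :: col.drop (k+1) := by
        unfold pvColStep pvArea
        have hgetD : col.getD k 0 = col[k]'hk := by
          simp [List.getD, List.getElem?_eq_getElem hk]
        split
        · rw [List.set_eq_take_append_cons_drop, if_pos hk, hgetD]
        · conv_lhs => rw [← List.take_append_drop k col, List.drop_eq_getElem_cons hk]
          simp
      rw [hstep]
      set col' := col.take k ++ (col[k]'hk + pvArea xs ys blocked outside j k) :: col.drop (k+1) with hcol'
      have hlen' : col'.length = col.length := by
        rw [hcol']; simp; omega
      rw [ih (k+1) col' (by omega)]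
      have hltk : (col.take k).length = k := by simp; omega
      have htk : col'.take (k+1) = col.take k ++ [col[k]'hk + pvArea xs ys blocked outside j k] := by
        rw [hcol', List.take_append, hltk]
        rw [List.take_of_length_le (by omega : (col.take k).length ≤ k+1)]
        simp
      have hdk : col'.drop (k+1) = col.drop (k+1) := by
        rw [hcol', List.drop_append, hltk]
        rw [List.drop_of_length_le (by omega : (col.take k).length ≤ k+1)]
        simp
      rw [htk, hdk]
      have hdrop : col.drop k = col[k]'hk :: col.drop (k+1) := by
        rw [List.drop_eq_getElem_cons hk]
      simp only [List.map_cons, List.append_assoc, List.singleton_append]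
      rw [hdrop, List.zipWith_cons_cons]

-- Source B's outer loop: column totals accumulate, each output row is the scan of the totals
theorem Bfold (xs : List Int) (ys : List Int) (blocked : List (List Bool)) (outside : List (List Bool))
    (W : Nat) : ∀ (m j : Nat) (rows : List (List Int)),
    (List.range' j m).foldl (pvBRow xs ys blocked outside W) (colAcc xs ys blocked outside W j, rows)
    = (colAcc xs ys blocked outside W (j+m),
       rows ++ (List.range' j m).map (fun j' => pvScanRow (colAcc xs ys blocked outside W (j'+1)))) := by
  intro m
  induction m with
  | zero => intro j rows; simp
  | succ m ih =>
      intro j rows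
      rw [List.range'_succ, List.foldl_cons]
      have hstep : pvBRow xs ys blocked outside W (colAcc xs ys blocked outside W j, rows) j
          = (colAcc xs ys blocked outside W (j+1),
             rows ++ [pvScanRow (colAcc xs ys blocked outside W (j+1))]) := by
        unfold pvBRow
        have hc : (List.range W).foldl (pvColStep xs blocked outside j (ys.getD (j+1) 0 - ys.getD j 0))
            (colAcc xs ys blocked outside W j) = colAcc xs ys blocked outside W (j+1) := by
          rw [List.range_eq_range',
              colfold xs ys blocked outside j W 0 _ (by rw [colAcc_length]; omega)]
          simp [colAcc, List.range_eq_range']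
        rw [hc]
      rw [hstep, ih (j+1) _]
      have : j + 1 + m = j + (m + 1) := by omega
      rw [this]
      simp

-- A's per-cell area equals pvArea (the boolean b || (!b && !o) equals b || !o)
theorem cell_eq (xs : List Int) (ys : List Int) (blocked : List (List Bool)) (outside : List (List Bool)) (j : Nat) :
    pvCell xs blocked outside j (ys.getD (j+1) 0 - ys.getD j 0) = pvArea xs ys blocked outside j := by
  funext i
  unfold pvCell pvArea
  cases (blocked.getD j []).getD i false <;> simp

-- generic inner-loop step acting on a single row (the set at j+1 commuted out)
def pvStepG (prev : List Int) (a : Nat → Int) (st : List Int × Int) (k : Nat) : List Int × Int :=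
  (st.1.set (k+1) (prev.getD (k+1) 0 + (st.2 + a k)), st.2 + a k)

-- A's inner fold only writes row j+1 and reads row j; pull the set out of the fold
theorem A_inner_commute (xs : List Int) (blocked : List (List Bool)) (outside : List (List Bool))
    (j : Nat) (height : Int) :
    ∀ (m k : Nat) (ps : List (List Int)) (s : Int), j + 1 < ps.length →
    (List.range' k m).foldl (pvAInner xs blocked outside j height) (ps, s)
    = ((ps.set (j+1)
          (((List.range' k m).foldl (pvStepG (ps.getD j []) (pvCell xs blocked outside j height)) (ps.getD (j+1) [], s)).1)),
       (((List.range' k m).foldl (pvStepG (ps.getD j []) (pvCell xs blocked outside j height)) (ps.getD (j+1) [], s)).2)) := by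
  intro m
  induction m with
  | zero =>
      intro k ps s h
      simp only [List.range', List.foldl_nil]
      rw [List.getD, List.getElem?_eq_getElem h]
      simp
  | succ m ih =>
      intro k ps s h
      rw [List.range'_succ]
      simp only [List.foldl_cons]
      have hstep : pvAInner xs blocked outside j height (ps, s) k
          = (ps.set (j+1) ((ps.getD (j+1) []).set (k+1) ((ps.getD j []).getD (k+1) 0 + (s + pvCell xs blocked outside j height k))), s + pvCell xs blocked outside j height k) := rfl
      rw [hstep]
      rw [ih (k+1) _ _ (by simpa using h)]
      have hgj : (ps.set (j+1) ((ps.getD (j+1) []).set (k+1) ((ps.getD j []).getD (k+1) 0 + (s + pvCell xs blocked outside j height k)))).getD j []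
          = ps.getD j [] := by
        simp [List.getD, List.getElem?_set_ne (by omega : j + 1 ≠ j)]
      have hgj1 : (ps.set (j+1) ((ps.getD (j+1) []).set (k+1) ((ps.getD j []).getD (k+1) 0 + (s + pvCell xs blocked outside j height k)))).getD (j+1) []
          = (ps.getD (j+1) []).set (k+1) ((ps.getD j []).getD (k+1) 0 + (s + pvCell xs blocked outside j height k)) := by
        simp [List.getD, List.getElem?_set_self h]
      rw [hgj, hgj1, List.set_set]
      have hG : pvStepG (ps.getD j []) (pvCell xs blocked outside j height) (ps.getD (j+1) [], s) k
          = ((ps.getD (j+1) []).set (k+1) ((ps.getD j []).getD (k+1) 0 + (s + pvCell xs blocked outside j height k)), s + pvCell xs blocked outside j height k) := rfl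
      rw [hG]

-- the generic row fold computes zipWith (+) prev (prefix sums)
theorem G_zip (a : Nat → Int) (prev : List Int) :
    ∀ (m k : Nat) (p : List Int), p.length = k+1 → k + 1 + m ≤ prev.length →
    ((List.range' k m).foldl (pvStepG prev a)
        (List.zipWith (· + ·) (prev.take (k+1)) p ++ List.replicate m 0, p.getLastD 0)).1
    = List.zipWith (· + ·) (prev.take (k+1+m)) (p ++ scanSums (p.getLastD 0) ((List.range' k m).map a)) := by
  intro m
  induction m with
  | zero =>
      intro k p hp hk
      simp [List.range', scanSums]
  | succ m ih =>
      intro k p hp hk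
      have hkp : k + 1 < prev.length := by omega
      have hZ : (List.zipWith (· + ·) (prev.take (k+1)) p).length = k + 1 := by
        simp [List.length_zipWith, hp]
        omega
      set s := p.getLastD 0 with hs
      rw [List.range'_succ, List.foldl_cons]
      have hstep : pvStepG prev a (List.zipWith (· + ·) (prev.take (k+1)) p ++ List.replicate (m+1) 0, s) k
          = ((List.zipWith (· + ·) (prev.take (k+1)) p ++ List.replicate (m+1) 0).set (k+1)
               (prev.getD (k+1) 0 + (s + a k)), s + a k) := rfl
      rw [hstep]
      have hset : (List.zipWith (· + ·) (prev.take (k+1)) p ++ List.replicate (m+1) 0).set (k+1)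
               (prev.getD (k+1) 0 + (s + a k))
          = List.zipWith (· + ·) (prev.take (k+2)) (p ++ [s + a k]) ++ List.replicate m 0 := by
        rw [List.set_append_right _ _ (le_of_eq hZ)]
        rw [hZ, Nat.sub_self]
        simp only [List.replicate_succ, List.set_cons_zero]
        have htake : List.take (k+2) prev = List.take (k+1) prev ++ [prev[k+1]'hkp] := by
          rw [List.take_add_one, List.getElem?_eq_getElem hkp]
          rfl
        rw [htake, List.zipWith_append (h := by rw [List.length_take]; omega)]
        simp [List.getD, List.getElem?_eq_getElem hkp]
      rw [hset]
      have hlast : (p ++ [s + a k]).getLastD 0 = s + a k := by simp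
      have := ih (k+1) (p ++ [s + a k]) (by simp [hp]) (by omega)
      rw [hlast] at this
      rw [this]
      have harith : k + 1 + 1 + m = k + 1 + (m + 1) := by omega
      rw [harith]
      congr 1
      simp [scanSums]

-- the outer loops agree: A keeps the pending zero rows in place, pvBStep appends rows
theorem outer_eq (xs : List Int) (ys : List Int) (blocked : List (List Bool)) (outside : List (List Bool)) (W : Nat) :
    ∀ (m j : Nat) (acc : List (List Int)),
    acc.length = j + 1 →
    (acc.getLastD []).length = W + 1 →
    (acc.getLastD []).getD 0 0 = 0 →
    (List.range' j m).foldl (pvAOuter xs ys blocked outside W)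
        (acc ++ List.replicate m (List.replicate (W+1) 0))
    = (List.range' j m).foldl
        (fun ps j' => pvBStep ps ((List.range W).map (pvArea xs ys blocked outside j'))) acc := by
  intro m
  induction m with
  | zero => intro j acc _ _ _; simp
  | succ m ih =>
      intro j acc hlen hplen hp0
      obtain ⟨p0, pt, hprev⟩ : ∃ p0 pt, acc.getLastD [] = p0 :: pt := by
        cases h : acc.getLastD [] with
        | nil => rw [h] at hplen; simp at hplen
        | cons p0 pt => exact ⟨p0, pt, rfl⟩
      have hp0' : p0 = 0 := by rw [hprev] at hp0; simpa using hp0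
      subst hp0'
      have haccne : acc ≠ [] := by intro h; rw [h] at hlen; simp at hlen
      have hlen' : (acc ++ List.replicate (m+1) (List.replicate (W+1) (0:Int))).length = j + 1 + (m + 1) := by
        simp [hlen]
      rw [List.range'_succ, List.foldl_cons, List.foldl_cons]
      have hj1 : j + 1 < (acc ++ List.replicate (m+1) (List.replicate (W+1) (0:Int))).length := by
        rw [hlen']; omega
      have hgetj : (acc ++ List.replicate (m+1) (List.replicate (W+1) (0:Int))).getD j [] = acc.getLastD [] := by
        have hjlt : j < acc.length := by omega
        rw [List.getD, List.getElem?_append_left hjlt]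
        rw [List.getLastD_eq_getLast?, List.getLast?_eq_getElem?]
        have : acc.length - 1 = j := by omega
        rw [this]
      have hgetj1 : (acc ++ List.replicate (m+1) (List.replicate (W+1) (0:Int))).getD (j+1) []
          = List.replicate (W+1) (0:Int) := by
        rw [List.getD, List.getElem?_append_right (by omega : acc.length ≤ j + 1)]
        have : j + 1 - acc.length = 0 := by omega
        rw [this]
        simp [List.replicate_succ]
      have hA : pvAOuter xs ys blocked outside W (acc ++ List.replicate (m+1) (List.replicate (W+1) (0:Int))) j
          = acc ++ (List.zipWith (· + ·) (acc.getLastD [])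
              (0 :: scanSums 0 ((List.range W).map (pvArea xs ys blocked outside j))))
            :: List.replicate m (List.replicate (W+1) (0:Int)) := by
        unfold pvAOuter
        rw [List.range_eq_range']
        rw [A_inner_commute xs blocked outside j _ W 0 _ 0 hj1]
        rw [hgetj, hgetj1]
        have hzrep : List.replicate (W+1) (0:Int)
            = List.zipWith (· + ·) ((acc.getLastD []).take 1) [0] ++ List.replicate W 0 := by
          rw [hprev]
          simp [List.replicate_succ]
        rw [hzrep]
        have h01 : ([0] : List Int).getLastD 0 = 0 := rfl
        have := G_zip (pvCell xs blocked outside j (ys.getD (j+1) 0 - ys.getD j 0)) (acc.getLastD []) W 0 [0]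
          (by simp) (by rw [hprev] at hplen ⊢; simp at hplen; simp; omega)
        rw [h01] at this
        rw [this]
        have htake : (acc.getLastD []).take (0 + 1 + W) = acc.getLastD [] := by
          apply List.take_of_length_le; rw [hplen]; omega
        rw [htake, cell_eq, List.set_append_right _ _ (by omega : acc.length ≤ j + 1)]
        have : j + 1 - acc.length = 0 := by omega
        rw [this]
        simp [List.replicate_succ]
      rw [hA]
      have hrow : pvBStep acc ((List.range W).map (pvArea xs ys blocked outside j))
          = acc ++ [List.zipWith (· + ·) (acc.getLastD [])
              (0 :: scanSums 0 ((List.range W).map (pvArea xs ys blocked outside j)))] := by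
        unfold pvBStep
        rw [pvPref_eq]
      set newrow := List.zipWith (· + ·) (acc.getLastD [])
          (0 :: scanSums 0 ((List.range W).map (pvArea xs ys blocked outside j))) with hnr
      have hcons : acc ++ newrow :: List.replicate m (List.replicate (W+1) (0:Int))
          = (acc ++ [newrow]) ++ List.replicate m (List.replicate (W+1) (0:Int)) := by
        simp
      rw [hcons, hrow]
      apply ih (j+1) (acc ++ [newrow])
      · simp [hlen]
      · rw [List.getLastD_concat, hnr, hprev]
        simp [scanSums_length]
        rw [hprev] at hplen
        simp at hplen
        omega
      · rw [List.getLastD_concat, hnr, hprev]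
        simp

-- the pvBStep fold emits exactly the scans of the column totals
theorem Astep_rows (xs : List Int) (ys : List Int) (blocked : List (List Bool)) (outside : List (List Bool))
    (W : Nat) : ∀ (m j : Nat) (acc : List (List Int)),
    acc.getLastD [] = 0 :: scanSums 0 (colAcc xs ys blocked outside W j) →
    (List.range' j m).foldl
        (fun ps j' => pvBStep ps ((List.range W).map (pvArea xs ys blocked outside j'))) acc
    = acc ++ (List.range' j m).map (fun j' => 0 :: scanSums 0 (colAcc xs ys blocked outside W (j'+1))) := by
  intro m
  induction m with
  | zero => intro j acc _; simp
  | succ m ih =>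
      intro j acc hlast
      rw [List.range'_succ, List.foldl_cons]
      have hrow : pvBStep acc ((List.range W).map (pvArea xs ys blocked outside j))
          = acc ++ [0 :: scanSums 0 (colAcc xs ys blocked outside W (j+1))] := by
        unfold pvBStep
        rw [pvPref_eq, hlast]
        congr 2
        rw [show (0:Int) :: scanSums 0 (colAcc xs ys blocked outside W j) = scanSums 0 (0 :: colAcc xs ys blocked outside W j) from by simp [scanSums],
            show (0:Int) :: scanSums 0 ((List.range W).map (pvArea xs ys blocked outside j)) = scanSums 0 (0 :: (List.range W).map (pvArea xs ys blocked outside j)) from by simp [scanSums]]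
        rw [scan_zip _ _ 0 0 (by simp [colAcc_length])]
        simp [colAcc, scanSums]
      rw [hrow, ih (j+1) _ (by rw [List.getLastD_concat])]
      simp

-- ===== VERDICT (by name: the statement is the Claim_ definition above) =====
theorem build_allowed_prefix_spec : Claim_equal_build_allowed_prefix := by
  intro xs ys blocked outside _ _
  unfold Spec_build_allowed_prefix
  show List.foldl (pvAOuter xs ys blocked outside (blocked.headD []).length)
      (List.replicate (blocked.length + 1) (List.replicate ((blocked.headD []).length + 1) 0))
      (List.range blocked.length)
    = [List.replicate ((blocked.headD []).length + 1) (0:Int)]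
      ++ ((List.range blocked.length).foldl
            (pvBRow xs ys blocked outside (blocked.headD []).length)
            (List.replicate (blocked.headD []).length 0, [])).2
  set W := (blocked.headD []).length with hW
  set H := blocked.length with hH
  -- A side: reduce to the pvBStep fold, then to the explicit row list
  have hArepl : List.replicate (H + 1) (List.replicate (W+1) (0:Int))
      = [List.replicate (W+1) 0] ++ List.replicate H (List.replicate (W+1) 0) := by
    simp [List.replicate_succ]
  have hA : List.foldl (pvAOuter xs ys blocked outside W)
      (List.replicate (H + 1) (List.replicate (W+1) (0:Int))) (List.range H)
      = [List.replicate (W+1) (0:Int)]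
        ++ (List.range' 0 H).map (fun j' => 0 :: scanSums 0 (colAcc xs ys blocked outside W (j'+1))) := by
    rw [show List.range H = List.range' 0 H from List.range_eq_range', hArepl]
    rw [outer_eq xs ys blocked outside W H 0 _ (by simp) (by simp) (by simp)]
    rw [Astep_rows xs ys blocked outside W H 0 _
        (by simp [colAcc, scanSums_zero, List.replicate_succ])]
  rw [hA]
  -- B side
  have hB : ((List.range H).foldl (pvBRow xs ys blocked outside W) (List.replicate W 0, [])).2
      = (List.range' 0 H).map (fun j' => pvScanRow (colAcc xs ys blocked outside W (j'+1))) := by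
    rw [show List.range H = List.range' 0 H from List.range_eq_range',
        show (List.replicate W (0:Int)) = colAcc xs ys blocked outside W 0 from rfl,
        Bfold xs ys blocked outside W H 0 []]
    simp
  rw [hB]
  congr 1
  apply List.map_congr_left
  intro j _
  rw [pvScanRow_eq]
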